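-- pv_equiv track=rewrite | github.com/zt2859585885/python_nfp | main.py | get_nfp
-- ===== SOURCE A (Python) =====
-- def get_nfp(s):
--     s1 = []
--     s2 = []
--     nfp = []
--     for i in range(len(s)):
--         s1.append(s[i][0])
--         s2.append(s[i][1])
--         x = sum(s1[:i+1])
--         y = sum(s2[:i+1])
--         nfp.append([x,y])
--     return nfp
-- ===== SOURCE B (Python) =====
-- def _scan(vals):
--     totals = []
--     t = 0
--     for v in vals:
--         t += v
--         totals.append(t)
--     return totals
--
--
-- def get_nfp(s):
--     xs = [p[0] for p in s]
--     ys = [p[1] for p in s]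
--     return [list(pair) for pair in zip(_scan(xs), _scan(ys))]
-- ===== Notes on version B (the rewrite author's own statement) =====
-- stated objective: alternative
-- what changed: B splits the input into its two columns, computes each column's running prefix sums in one linear scan, and zips the scans back into pairs, replacing A's per-element re-summation of a growing slice.
import Mathlib
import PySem

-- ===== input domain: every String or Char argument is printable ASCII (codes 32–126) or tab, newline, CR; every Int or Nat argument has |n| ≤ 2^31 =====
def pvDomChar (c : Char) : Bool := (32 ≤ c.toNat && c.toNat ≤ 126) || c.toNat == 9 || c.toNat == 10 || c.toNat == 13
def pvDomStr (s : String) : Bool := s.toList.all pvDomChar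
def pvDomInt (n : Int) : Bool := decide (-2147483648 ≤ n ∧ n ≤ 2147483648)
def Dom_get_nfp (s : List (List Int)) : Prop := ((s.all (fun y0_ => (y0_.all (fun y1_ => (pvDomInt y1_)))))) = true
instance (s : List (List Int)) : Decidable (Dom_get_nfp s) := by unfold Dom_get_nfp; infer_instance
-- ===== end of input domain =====

-- B replaces A's per-element re-summation of growing slices by a column split, one
-- running prefix-sum scan per column, and a zip recombining the pairs (objective: alternative).

-- ===== PORT A =====
-- A's loop over range(len(s)) with state (s1, s2, nfp); x = sum(s1[:i+1]), y = sum(s2[:i+1]).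
def get_nfp (s : List (List Int)) : List (List Int) :=
  ((PySem.List.pyRange 0 (s.length : Int) 1).foldl
    (fun (st : List Int × List Int × List (List Int)) i =>
      let s1 := st.1 ++ [PySem.List.pyGetD (PySem.List.pyGetD s i []) 0 0]
      let s2 := st.2.1 ++ [PySem.List.pyGetD (PySem.List.pyGetD s i []) 1 0]
      let x := (PySem.List.slice s1 none (some (i + 1))).sum
      let y := (PySem.List.slice s2 none (some (i + 1))).sum
      (s1, s2, st.2.2 ++ [[x, y]]))
    ([], [], [])).2.2

-- ===== PORT B =====
-- _scan: running prefix sums in one pass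
def pvScan (vals : List Int) : List Int :=
  (vals.foldl (fun (st : Int × List Int) v => (st.1 + v, st.2 ++ [st.1 + v])) (0, [])).2

def get_nfp_alt (s : List (List Int)) : List (List Int) :=
  let xs := s.map (fun p => PySem.List.pyGetD p 0 0)
  let ys := s.map (fun p => PySem.List.pyGetD p 1 0)
  ((pvScan xs).zip (pvScan ys)).map (fun q => [q.1, q.2])

-- ===== PRECONDITION & SPEC =====
-- Pre_ excludes exactly the inputs where Python raises IndexError: some row shorter than 2.
def Pre_get_nfp (s : List (List Int)) : Prop := ∀ p ∈ s, 2 ≤ p.length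
instance (s : List (List Int)) : Decidable (Pre_get_nfp s) := by unfold Pre_get_nfp; infer_instance
def pvWitness_get_nfp : List (List Int) := [[1, 2], [3, -4], [5, 6]]

def Spec_get_nfp (s : List (List Int)) (out : List (List Int)) : Prop := out = get_nfp_alt s
instance (s : List (List Int)) (out : List (List Int)) : Decidable (Spec_get_nfp s out) := by unfold Spec_get_nfp; infer_instance

-- ===== CLAIM (what is proved, stated in full; the proofs are below) =====
def Claim_equal_get_nfp : Prop := ∀ (s : List (List Int)), Dom_get_nfp s → Pre_get_nfp s → Spec_get_nfp s (get_nfp s)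

-- ===== LEMMAS AND PROOFS =====

-- the two columns
def pvCol (s : List (List Int)) (j : Int) : List Int := s.map (fun p => PySem.List.pyGetD p j 0)

-- B's scan characterised: prefix sums, entry k = sum of the first k+1 values
lemma pvScan_inv (vals : List Int) (t : Int) (acc : List Int) :
    (vals.foldl (fun (st : Int × List Int) v => (st.1 + v, st.2 ++ [st.1 + v])) (t, acc)) =
      (t + vals.sum, acc ++ (List.range vals.length).map (fun k => t + (vals.take (k + 1)).sum)) := by
  induction vals generalizing t acc with
  | nil => simp
  | cons v vs ih =>
      simp only [List.foldl_cons, ih, List.length_cons, List.sum_cons, List.range_succ_eq_map,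
        Prod.mk.injEq]
      refine ⟨by ring, ?_⟩
      simp only [List.map_cons, List.map_map, List.take_succ_cons, List.sum_cons,
        List.append_assoc, List.singleton_append]
      congr 2
      · simp
      · refine List.map_congr_left fun k _ => ?_
        simp only [Function.comp_apply]
        ring

lemma pvScan_eq (vals : List Int) :
    pvScan vals = (List.range vals.length).map (fun k => (vals.take (k + 1)).sum) := by
  simp [pvScan, pvScan_inv]

-- A's loop invariant: after the first n iterations, s1/s2 hold the first n column entries
-- and nfp holds the first n prefix-sum pairs.
lemma getNfp_inv (s : List (List Int)) (n : Nat) (hn : n ≤ s.length) :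
    (PySem.List.pyRange 0 (n : Int) 1).foldl
      (fun (st : List Int × List Int × List (List Int)) i =>
        let s1 := st.1 ++ [PySem.List.pyGetD (PySem.List.pyGetD s i []) 0 0]
        let s2 := st.2.1 ++ [PySem.List.pyGetD (PySem.List.pyGetD s i []) 1 0]
        let x := (PySem.List.slice s1 none (some (i + 1))).sum
        let y := (PySem.List.slice s2 none (some (i + 1))).sum
        (s1, s2, st.2.2 ++ [[x, y]]))
      ([], [], []) =
    ((pvCol s 0).take n, (pvCol s 1).take n,
      (List.range n).map (fun k =>
        [((pvCol s 0).take (k + 1)).sum, ((pvCol s 1).take (k + 1)).sum])) := by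
  induction n with
  | zero => simp
  | succ n ih =>
      have hn' : n ≤ s.length := Nat.le_of_succ_le hn
      have hlt : n < s.length := hn
      have hsplit : PySem.List.pyRange 0 ((n + 1 : Nat) : Int) 1 =
          PySem.List.pyRange 0 (n : Int) 1 ++ [(n : Int)] := by
        push_cast
        exact PySem.List.pyRange_one_succ_right (by positivity)
      rw [hsplit, List.foldl_append, ih hn']
      simp only [List.foldl_cons, List.foldl_nil]
      have hs : PySem.List.pyGetD s (n : Int) [] = s[n] := by
        rw [PySem.List.pyGetD_natCast]; exact List.getD_eq_getElem s [] hlt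
      have hc0 : n < (pvCol s 0).length := by simpa [pvCol]
      have hc1 : n < (pvCol s 1).length := by simpa [pvCol]
      have h0 : (pvCol s 0).take n ++ [PySem.List.pyGetD (PySem.List.pyGetD s (n : Int) []) 0 0] =
          (pvCol s 0).take (n + 1) := by
        rw [hs, List.take_add_one, List.getElem?_eq_getElem hc0]
        simp [pvCol]
      have h1 : (pvCol s 1).take n ++ [PySem.List.pyGetD (PySem.List.pyGetD s (n : Int) []) 1 0] =
          (pvCol s 1).take (n + 1) := by
        rw [hs, List.take_add_one, List.getElem?_eq_getElem hc1]
        simp [pvCol]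
      have hslice : ∀ (l : List Int), l.length = n + 1 →
          PySem.List.slice l none (some ((n : Int) + 1)) = l := by
        intro l hl
        have h2 : ((n : Int) + 1) = ((n + 1 : Nat) : Int) := by push_cast; ring
        rw [h2, PySem.List.slice_to_natCast, ← hl, List.take_length]
      simp only [h0, h1]
      rw [hslice _ (by simp [List.length_take, Nat.min_eq_left (by omega : n + 1 ≤ (pvCol s 0).length)]),
          hslice _ (by simp [List.length_take, Nat.min_eq_left (by omega : n + 1 ≤ (pvCol s 1).length)])]
      simp [List.range_succ]

lemma get_nfp_eq_common (s : List (List Int)) :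
    get_nfp s = (List.range s.length).map (fun k =>
      [((pvCol s 0).take (k + 1)).sum, ((pvCol s 1).take (k + 1)).sum]) := by
  unfold get_nfp
  rw [getNfp_inv s s.length le_rfl]

lemma get_nfp_alt_eq_common (s : List (List Int)) :
    get_nfp_alt s = (List.range s.length).map (fun k =>
      [((pvCol s 0).take (k + 1)).sum, ((pvCol s 1).take (k + 1)).sum]) := by
  unfold get_nfp_alt
  simp only [pvScan_eq, List.length_map]
  rw [List.zip_map', List.map_map]
  rfl

-- ===== VERDICT (by name: the statement is the Claim_ definition above) =====
theorem get_nfp_spec : Claim_equal_get_nfp := by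
  intro s _ _
  unfold Spec_get_nfp
  rw [get_nfp_eq_common, get_nfp_alt_eq_common]
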